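-- pv_equiv track=rewrite | github.com/Somanshu-Jha/AI-Accelerated-Reading-Platform | blog_fetcher/multi_search.py | prioritize_sources
-- ===== SOURCE A (Python) =====
-- TRUSTED_DOMAINS = [
--     "medium.com",
--     "dev.to",
--     "towardsdatascience.com",
--     "hashnode.com"
--     "buzzfeed.com"
--     "Mashable.com"
--     "HackerNoon.com"
--     "Boing Boing.com"
--     "The Verge.com"
--     "KDnuggets.com"
--     "CoinDesk.com"
--     "9to5Mac.com"
--     "Engadget.com"
--     "Wired.com"
--     "Ars Technica.com"
--     "Nir and Far.com"
--     "Big Think.com"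
--
-- ]
--
-- def prioritize_sources(urls):
--
--     trusted = []
--     others = []
--
--     for url in urls:
--
--         if any(domain in url for domain in TRUSTED_DOMAINS):
--             trusted.append(url)
--
--         else:
--             others.append(url)
--
--     return trusted + others
-- ===== SOURCE B (Python) =====
-- TRUSTED_DOMAINS = [
--     "medium.com",
--     "dev.to",
--     "towardsdatascience.com",
--     "hashnode.com"
--     "buzzfeed.com"
--     "Mashable.com"
--     "HackerNoon.com"
--     "Boing Boing.com"
--     "The Verge.com"
--     "KDnuggets.com"
--     "CoinDesk.com"
--     "9to5Mac.com"
--     "Engadget.com"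
--     "Wired.com"
--     "Ars Technica.com"
--     "Nir and Far.com"
--     "Big Think.com"
--
-- ]
--
--
-- def prioritize_sources(urls):
--     return sorted(urls, key=lambda u: not any(d in u for d in TRUSTED_DOMAINS))
-- ===== Notes on version B (the rewrite author's own statement) =====
-- stated objective: idiomatic
-- what changed: Replaces the two-bucket partition-and-concatenate loop with a single stable sort keyed on trustedness (key False for trusted URLs), relying on sort stability to preserve order within each group.
import Mathlib
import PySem

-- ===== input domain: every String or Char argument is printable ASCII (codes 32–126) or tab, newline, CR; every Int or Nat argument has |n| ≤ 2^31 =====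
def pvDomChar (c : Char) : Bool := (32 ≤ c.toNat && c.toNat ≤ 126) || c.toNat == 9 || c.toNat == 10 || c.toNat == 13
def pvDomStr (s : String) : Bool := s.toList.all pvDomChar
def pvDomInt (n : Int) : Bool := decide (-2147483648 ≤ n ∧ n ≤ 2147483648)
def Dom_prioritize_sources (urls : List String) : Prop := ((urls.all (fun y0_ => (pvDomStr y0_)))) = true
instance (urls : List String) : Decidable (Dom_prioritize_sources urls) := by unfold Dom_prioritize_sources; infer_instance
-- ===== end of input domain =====

-- B replaces A's two-bucket partition-and-concatenate loop with one stable sort keyed on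
-- trustedness (idiomatic one-liner); same return value, no speed claim.

-- module constant TRUSTED_DOMAINS: the adjacent string literals after "hashnode.com"
-- concatenate in Python, so the list has exactly these 4 elements
def pvTRUSTED_DOMAINS : List String :=
  ["medium.com", "dev.to", "towardsdatascience.com",
   "hashnode.combuzzfeed.comMashable.comHackerNoon.comBoing Boing.comThe Verge.comKDnuggets.comCoinDesk.com9to5Mac.comEngadget.comWired.comArs Technica.comNir and Far.comBig Think.com"]

-- ===== PORT A =====
def prioritize_sources (urls : List String) : List String :=
  let p := urls.foldl (fun (acc : List String × List String) url =>
    if pvTRUSTED_DOMAINS.any (fun domain => PySem.Str.isIn domain url) then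
      (acc.1 ++ [url], acc.2)
    else
      (acc.1, acc.2 ++ [url])) ([], [])
  p.1 ++ p.2

-- ===== PORT B =====
-- key u = not any(d in u …): Python sorts False < True; ported as Int 0/1
def pvKey (u : String) : Int :=
  if (pvTRUSTED_DOMAINS.any (fun d => PySem.Str.isIn d u)) = false then 1 else 0

def prioritize_sources_alt (urls : List String) : List String :=
  PySem.List.sorted urls pvKey

-- ===== PRECONDITION & SPEC =====
def Spec_prioritize_sources (urls : List String) (out : List String) : Prop := out = prioritize_sources_alt urls
instance (urls : List String) (out : List String) : Decidable (Spec_prioritize_sources urls out) := by unfold Spec_prioritize_sources; infer_instance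

-- ===== CLAIM (what is proved, stated in full; the proofs are below) =====
def Claim_equal_prioritize_sources : Prop := ∀ (urls : List String), Dom_prioritize_sources urls → Spec_prioritize_sources urls (prioritize_sources urls)

-- ===== LEMMAS AND PROOFS =====

-- the comparison B's stable insertion sort uses
def pvBefore (a b : String) : Bool := decide (pvKey a < pvKey b)

theorem pvKey_cases (u : String) : pvKey u = 0 ∨ pvKey u = 1 := by
  unfold pvKey; split_ifs <;> simp

theorem pvBefore_false_of_key_one (x y : String) (hx : pvKey x = 1) :
    pvBefore x y = false := by
  rcases pvKey_cases y with hy | hy <;> simp [pvBefore, hx, hy]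

theorem pvBefore_of_keys (x y : String) (hx : pvKey x = 0) (hy : pvKey y = 1) :
    pvBefore x y = true := by
  simp [pvBefore, hx, hy]

theorem pvBefore_false_of_key_zero (x y : String) (hy : pvKey y = 0) :
    pvBefore x y = false := by
  rcases pvKey_cases x with hx | hx <;> simp [pvBefore, hx, hy]

theorem insertBy_append_of_not_before (x : String) (t o : List String)
    (ht : ∀ y ∈ t, pvBefore x y = false) :
    PySem.List.insertBy pvBefore x (t ++ o) = t ++ PySem.List.insertBy pvBefore x o := by
  induction t with
  | nil => simp
  | cons a t ih =>
      have ha := ht a (by simp)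
      simp [PySem.List.insertBy, ha, ih (fun y hy => ht y (by simp [hy]))]

-- loop invariant: folding insertBy over t ++ o (t trusted-only, o untrusted-only)
-- equals folding A's two-bucket step from (t, o)
theorem pv_inv (us : List String) : ∀ (t o : List String),
    (∀ y ∈ t, pvKey y = 0) → (∀ y ∈ o, pvKey y = 1) →
    us.foldl (fun acc x => PySem.List.insertBy (fun a b => decide (pvKey a < pvKey b)) x acc) (t ++ o)
      = (us.foldl (fun (acc : List String × List String) url =>
          if pvTRUSTED_DOMAINS.any (fun domain => PySem.Str.isIn domain url) then
            (acc.1 ++ [url], acc.2)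
          else
            (acc.1, acc.2 ++ [url])) (t, o)).1
        ++ (us.foldl (fun (acc : List String × List String) url =>
          if pvTRUSTED_DOMAINS.any (fun domain => PySem.Str.isIn domain url) then
            (acc.1 ++ [url], acc.2)
          else
            (acc.1, acc.2 ++ [url])) (t, o)).2 := by
  induction us with
  | nil => intro t o _ _; rfl
  | cons x us ih =>
      intro t o ht ho
      by_cases hx : (pvTRUSTED_DOMAINS.any (fun domain => PySem.Str.isIn domain x)) = true
      · -- x is trusted: key 0; it is inserted right after t, before all of o
        have hk : pvKey x = 0 := by unfold pvKey; rw [hx]; decide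
        have hins : PySem.List.insertBy pvBefore x (t ++ o) = (t ++ [x]) ++ o := by
          rw [insertBy_append_of_not_before x t o
                (fun y hy => pvBefore_false_of_key_zero x y (ht y hy))]
          cases o with
          | nil => simp [PySem.List.insertBy]
          | cons b o' =>
              have hb : pvBefore x b = true :=
                pvBefore_of_keys x b hk (ho b (by simp))
              simp [PySem.List.insertBy, hb]
        simp only [List.foldl_cons, hx, if_true]
        have : PySem.List.insertBy (fun a b => decide (pvKey a < pvKey b)) x (t ++ o)
            = (t ++ [x]) ++ o := hins
        rw [this]
        exact ih (t ++ [x]) o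
          (by intro y hy; rcases List.mem_append.mp hy with h | h
              · exact ht y h
              · simp at h; subst h; exact hk)
          ho
      · -- x is untrusted: key 1; it goes to the very end
        have hk : pvKey x = 1 := by unfold pvKey; rw [Bool.eq_false_iff.mpr hx]; decide
        have hins : PySem.List.insertBy pvBefore x (t ++ o) = t ++ (o ++ [x]) := by
          rw [PySem.List.insertBy_of_forall_not_before pvBefore x (t ++ o)
                (fun y _ => pvBefore_false_of_key_one x y hk)]
          simp
        simp only [List.foldl_cons, hx, if_false]
        have : PySem.List.insertBy (fun a b => decide (pvKey a < pvKey b)) x (t ++ o)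
            = t ++ (o ++ [x]) := hins
        rw [this]
        exact ih t (o ++ [x]) ht
          (by intro y hy; rcases List.mem_append.mp hy with h | h
              · exact ho y h
              · simp at h; subst h; exact hk)

-- ===== VERDICT (by name: the statement is the Claim_ definition above) =====
theorem prioritize_sources_spec : Claim_equal_prioritize_sources := by
  intro urls _
  unfold Spec_prioritize_sources prioritize_sources prioritize_sources_alt
  rw [PySem.List.sorted_eq_foldl_insertBy urls pvKey]
  exact (pv_inv urls [] [] (by simp) (by simp)).symm
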